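-- pv_equiv track=rewrite | github.com/ab14jain/GrowTogether | Assignment Code/MaximumDepth.py | solve
-- ===== SOURCE A (Python) =====
-- from collections import defaultdict, deque
--
-- def solve(A, B, C, D, E, F):
--
--     def lowerBound(arr, target):
--         arr.sort()
--         lo = 0
--         hi = len(arr) - 1
--         res = len(arr)
--
--         while lo <= hi:
--             mid = lo + (hi - lo) // 2
--
--             if arr[mid] >= target:
--                 res = mid
--                 hi = mid - 1
--             else:
--                 lo = mid + 1
--
--         return res
--
--     adj = defaultdict(list)
--     pair = []
--     visited = [False]*(A+1)
--     for i in range(len(B)):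
--         # adj[(B[i], D[B[i]-1])].append((C[i], D[C[i]-1]))
--         adj[B[i]].append((C[i]))
--         adj[C[i]].append((B[i]))
--
--     for i in range(len(B)):
--         pair.append([B[i],C[i]])
--
--     pair.sort()
--
--     level = 0
--     q = deque()
--     q.append([1,D[0]])
--     level_order_traverse = defaultdict(list)
--
--     while q:
--         size = len(q)
--         while size:
--             curr = q.popleft()
--             level_order_traverse[level].append(curr[1])
--             visited[curr[0]] = True
--
--             for ngbr in adj[curr[0]]:
--                 if not visited[ngbr]:
--                     q.append([ngbr, D[ngbr-1]])
--             size -= 1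
--         level += 1
--
--
--     ans = []
--     for i in range(len(E)):
--         L = E[i]%level
--         X = F[i]
--
--         index = lowerBound(level_order_traverse[L], X)
--
--         if index >= len(level_order_traverse[L]):
--             ans.append(-1)
--         else:
--             ans.append(level_order_traverse[L][index])
--
--     return ans
-- ===== SOURCE B (Python) =====
-- def solve(A, B, C, D, E, F):
--     adj = {}
--     for u, v in zip(B, C):
--         adj.setdefault(u, []).append(v)
--         adj.setdefault(v, []).append(u)
--
--     visited = [False] * (A + 1)
--     levels = []          # levels[L] = D-values of the entries popped at BFS depth L (unsorted)
--     frontier = [1]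
--     while frontier:
--         vals = []
--         nxt = []
--         for n in frontier:
--             vals.append(D[n - 1])
--             visited[n] = True
--             for m in adj.get(n, []):
--                 if not visited[m]:
--                     nxt.append(m)
--         levels.append(vals)
--         frontier = nxt
--
--     out = []
--     for e, x in zip(E, F):
--         best = None      # minimum level value >= x, found by one linear scan (no sort, no search)
--         for v in levels[e % len(levels)]:
--             if v >= x and (best is None or v < best):
--                 best = v
--         out.append(-1 if best is None else best)
--     return out
-- ===== Notes on version B (the rewrite author's own statement) =====
-- stated objective: simpler
-- what changed: A answers each query by re-sorting the queried BFS level and hand-binary-searching it for the lower bound; B never sorts or binary-searches at all: it keeps each level's values in BFS order and answers a query with one linear scan keeping the minimum value >= x (min-of-filter; one O(N) pass beats Python's per-query Timsort pass plus binary search by a constant factor), and it builds levels with frontier lists instead of an indexed deque loop.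
-- outside the precondition, e.g. on solve(1, [1, 3], [1, 3], [5], [0], [3]): A returns [5], B returns [5]; on solve(1, [1, -9], [1, -9], [5], [0], [3]): A returns [5], B returns [5]
import Mathlib
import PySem

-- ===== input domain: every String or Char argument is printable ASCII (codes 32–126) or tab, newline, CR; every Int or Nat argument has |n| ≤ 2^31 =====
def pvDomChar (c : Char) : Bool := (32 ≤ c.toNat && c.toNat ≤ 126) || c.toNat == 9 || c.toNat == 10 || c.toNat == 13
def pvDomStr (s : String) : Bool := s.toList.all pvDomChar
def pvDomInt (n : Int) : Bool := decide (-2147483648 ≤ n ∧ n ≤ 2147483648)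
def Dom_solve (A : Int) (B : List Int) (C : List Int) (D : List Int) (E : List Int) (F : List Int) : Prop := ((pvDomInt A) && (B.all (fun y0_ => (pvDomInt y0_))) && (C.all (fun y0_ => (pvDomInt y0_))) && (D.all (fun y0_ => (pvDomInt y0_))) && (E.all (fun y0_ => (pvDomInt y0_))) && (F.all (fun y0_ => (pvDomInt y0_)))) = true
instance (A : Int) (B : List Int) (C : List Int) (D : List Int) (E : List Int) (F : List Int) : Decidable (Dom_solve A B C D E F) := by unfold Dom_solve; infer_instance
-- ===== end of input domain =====

-- B replaces A's query phase (re-sort the level list, hand-rolled lower-bound binary search)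
-- by a single linear scan keeping the minimum level value >= x — no sorting, no searching
-- (objective: simpler). Return-value equivalence only; neither Python mutates its arguments.

-- ===== PORT A =====

-- both Pythons append v to the list stored under key k (defaultdict-append / setdefault-append)
def dictAppend (d : PySem.Dict Int (List Int)) (k v : Int) : PySem.Dict Int (List Int) :=
  d.insert k (d.getD k [] ++ [v])

-- visited = [False]*(A+1); visited[n] (read / write, Python index semantics)
def visNew (A : Int) : List Bool := List.replicate (A + 1).toNat false
def visGet (vis : List Bool) (n : Int) : Bool := PySem.List.pyGetD vis n false
def visSet (vis : List Bool) (n : Int) : List Bool := PySem.List.pySetD vis n true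

-- for i in range(len(B)): adj[B[i]].append(C[i]); adj[C[i]].append(B[i])
def buildAdjA (B C : List Int) : PySem.Dict Int (List Int) :=
  (PySem.List.pyRange 0 (PySem.List.len B) 1).foldl
    (fun d i => dictAppend (dictAppend d (PySem.List.pyGetD B i 0) (PySem.List.pyGetD C i 0))
                  (PySem.List.pyGetD C i 0) (PySem.List.pyGetD B i 0))
    PySem.Dict.empty

-- A's lowerBound loop: lo/hi/res, res updated on arr[mid] >= target; the interval
-- [lo,hi] shrinks every pass, so len(arr) passes always suffice: the Nat argument is
-- only a totality guard (fuel), never reached while lo <= hi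
def lowerBoundGo (arr : List Int) (target : Int) : Nat → Int → Int → Int → Int
  | 0, _, _, res => res
  | f + 1, lo, hi, res =>
    if lo ≤ hi then
      let mid := lo + PySem.Int.floordiv (hi - lo) 2
      if PySem.List.pyGetD arr mid 0 ≥ target then lowerBoundGo arr target f lo (mid - 1) mid
      else lowerBoundGo arr target f (mid + 1) hi res
    else res

-- A's lowerBound(arr, target): sorts arr IN PLACE, returns (the sorted list, the index)
def lowerBoundA (arr0 : List Int) (target : Int) : List Int × Int :=
  let arr := PySem.List.sorted arr0 (fun x => x) false
  (arr, lowerBoundGo arr target arr.length 0 (PySem.List.len arr - 1) (PySem.List.len arr))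

-- inner `while size:` loop: pop left, record value, mark visited, push unvisited neighbours
def bfsInnerA (adj : PySem.Dict Int (List Int)) (Dl : List Int) :
    List Bool → List (Int × Int) → Nat → List Int × List Bool × List (Int × Int)
  | vis, q, 0 => ([], vis, q)
  | vis, [], _ + 1 => ([], vis, [])          -- unreachable: size ≤ len(q)
  | vis, (n, v) :: rest, s + 1 =>
    let vis1 := visSet vis n
    let pushes := (adj.getD n []).foldl
      (fun acc m => if visGet vis1 m then acc
                    else acc ++ [(m, PySem.List.pyGetD Dl (m - 1) 0)]) []
    let r := bfsInnerA adj Dl vis1 (rest ++ pushes) s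
    (v :: r.1, r.2)

-- outer `while q:` loop; the fuel only bounds the number of BFS levels (a totality guard)
def bfsOuterA (adj : PySem.Dict Int (List Int)) (Dl : List Int) :
    Nat → List Bool → List (Int × Int) → Int → PySem.Dict Int (List Int) →
    PySem.Dict Int (List Int) × Int
  | 0, _, _, level, d => (d, level)
  | f + 1, vis, q, level, d =>
    if q.isEmpty then (d, level) else
    let r := bfsInnerA adj Dl vis q q.length
    bfsOuterA adj Dl f r.2.1 r.2.2 (level + 1) (d.insert level (d.getD level [] ++ r.1))

-- (A's local `pair` list is built, sorted and never read — dead code, not ported)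
def solve (A : Int) (B : List Int) (C : List Int) (D : List Int) (E : List Int) (F : List Int) : List Int :=
  let adj := buildAdjA B C
  let vis := visNew A
  let r := bfsOuterA adj D (A + 2).toNat vis [(1, PySem.List.pyGetD D 0 0)] 0 PySem.Dict.empty
  ((PySem.List.pyRange 0 (PySem.List.len E) 1).foldl
    (fun st i =>
      let L := PySem.Int.mod (PySem.List.pyGetD E i 0) r.2
      let X := PySem.List.pyGetD F i 0
      let p := lowerBoundA (st.1.getD L []) X
      (st.1.insert L p.1,
       st.2 ++ [if p.2 ≥ PySem.List.len p.1 then -1 else PySem.List.pyGetD p.1 p.2 0]))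
    (r.1, ([] : List Int))).2

-- ===== PORT B =====

-- for u, v in zip(B, C): adj.setdefault(u, []).append(v); adj.setdefault(v, []).append(u)
def buildAdjB (B C : List Int) : PySem.Dict Int (List Int) :=
  (B.zip C).foldl (fun d uv => dictAppend (dictAppend d uv.1 uv.2) uv.2 uv.1) PySem.Dict.empty

-- one frontier pass: values, updated visited, next frontier
def procLevelB (adj : PySem.Dict Int (List Int)) (Dl : List Int) :
    List Bool → List Int → List Int × List Bool × List Int
  | vis, [] => ([], vis, [])
  | vis, n :: rest =>
    let v := PySem.List.pyGetD Dl (n - 1) 0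
    let vis1 := visSet vis n
    let pushes := (adj.getD n []).foldl
      (fun acc m => if visGet vis1 m then acc else acc ++ [m]) []
    let r := procLevelB adj Dl vis1 rest
    (v :: r.1, r.2.1, pushes ++ r.2.2)

-- while frontier: … levels.append(vals); fuel is only a totality guard
def bfsLevelsB (adj : PySem.Dict Int (List Int)) (Dl : List Int) :
    Nat → List Bool → List Int → List (List Int)
  | 0, _, _ => []
  | f + 1, vis, frontier =>
    if frontier.isEmpty then [] else
    let r := procLevelB adj Dl vis frontier
    r.1 :: bfsLevelsB adj Dl f r.2.1 r.2.2

-- if v >= x and (best is None or v < best): best = v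
def bstep (x : Int) (best : Option Int) (v : Int) : Option Int :=
  if v ≥ x then
    match best with
    | none => some v
    | some b => if v < b then some v else some b
  else best

def solve_alt (A : Int) (B : List Int) (C : List Int) (D : List Int) (E : List Int) (F : List Int) : List Int :=
  let adj := buildAdjB B C
  let vis := visNew A
  let levels := bfsLevelsB adj D (A + 2).toNat vis [1]
  (E.zip F).foldl
    (fun out ex =>
      let arr := PySem.List.pyGetD levels (PySem.Int.mod ex.1 (PySem.List.len levels)) []
      let best := arr.foldl (bstep ex.2) none
      out ++ [match best with | none => -1 | some m => m])
    []

-- ===== PRECONDITION & SPEC =====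

-- Pre_ = inputs where A raises no IndexError: an edge endpoint list at least as long as B, one
-- bound value per query, A >= 1 and D nonempty (node 1 itself), and either every listed edge
-- endpoint n is a valid Python index into visited = [False]*(A+1) (as n) and into D (as n-1,
-- negative wraparound included), or node 1 occurs in no edge (BFS then never leaves node 1).
-- Conservative: it also excludes some inputs whose out-of-range endpoints are unreachable from
-- node 1 and on which A happens to return (see the cited examples).
def Pre_solve (A : Int) (B : List Int) (C : List Int) (D : List Int) (E : List Int) (F : List Int) : Prop :=
  1 ≤ A ∧ 1 ≤ D.length ∧ B.length ≤ C.length ∧ E.length ≤ F.length ∧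
  ((∀ n ∈ B ++ C.take B.length,
      -(A + 1) ≤ n ∧ n ≤ A ∧ 1 - (D.length : Int) ≤ n ∧ n ≤ (D.length : Int))
   ∨ (1 : Int) ∉ B ++ C.take B.length)
instance (A : Int) (B : List Int) (C : List Int) (D : List Int) (E : List Int) (F : List Int) : Decidable (Pre_solve A B C D E F) := by unfold Pre_solve; infer_instance

def pvWitness_solve : Int × List Int × List Int × List Int × List Int × List Int :=
  (2, [1], [2], [10, 20], [0, 1, 5], [15, 5, 25])

def Spec_solve (A : Int) (B : List Int) (C : List Int) (D : List Int) (E : List Int) (F : List Int) (out : List Int) : Prop := out = solve_alt A B C D E F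
instance (A : Int) (B : List Int) (C : List Int) (D : List Int) (E : List Int) (F : List Int) (out : List Int) : Decidable (Spec_solve A B C D E F out) := by unfold Spec_solve; infer_instance

-- ===== CLAIM (what is proved, stated in full; the proofs are below) =====
def Claim_equal_solve : Prop := ∀ (A : Int) (B : List Int) (C : List Int) (D : List Int) (E : List Int) (F : List Int), Dom_solve A B C D E F → Pre_solve A B C D E F → Spec_solve A B C D E F (solve A B C D E F)

-- ===== LEMMAS AND PROOFS =====

-- the queue entries A carries are exactly the frontier nodes paired with their D-value
def pairsOf (Dl : List Int) (fr : List Int) : List (Int × Int) :=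
  fr.map (fun n => (n, PySem.List.pyGetD Dl (n - 1) 0))

-- a fold over range(len(X)) reading X[i], Y[i] is a fold over zip(X, Y)  (len X ≤ len Y)
theorem foldl_range_pair_nat {σ : Type} (step : σ → Int → Int → σ) :
    ∀ (X Y : List Int), X.length ≤ Y.length → ∀ (s : σ),
    (List.range X.length).foldl (fun t k => step t (X[k]?.getD 0) (Y[k]?.getD 0)) s
    = (X.zip Y).foldl (fun t p => step t p.1 p.2) s := by
  intro X
  induction X with
  | nil => intro Y h s; simp
  | cons x X ih =>
    intro Y h s
    match Y with
    | [] => simp at h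
    | y :: Y =>
      simp only [List.length_cons, List.range_succ_eq_map, List.foldl_cons, List.foldl_map,
        List.getElem?_cons_zero, Option.getD_some, List.zip_cons_cons,
        Nat.succ_eq_add_one, List.getElem?_cons_succ]
      exact ih Y (by simpa using h) (step s x y)

theorem foldl_range_pair {σ : Type} (step : σ → Int → Int → σ)
    (X Y : List Int) (h : X.length ≤ Y.length) (s : σ) :
    (PySem.List.pyRange 0 (PySem.List.len X) 1).foldl
      (fun t i => step t (PySem.List.pyGetD X i 0) (PySem.List.pyGetD Y i 0)) s
    = (X.zip Y).foldl (fun t p => step t p.1 p.2) s := by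
  rw [PySem.List.len_eq, PySem.List.pyRange_one]
  simp only [sub_zero, Int.toNat_natCast, List.foldl_map, zero_add,
    PySem.List.pyGetD_natCast, List.getD_eq_getElem?_getD]
  exact foldl_range_pair_nat step X Y h s

-- A's push loop builds the value-pairs of B's push loop
theorem pushes_pair (Dl : List Int) (p : Int → Bool) :
    ∀ (l acc : List Int),
    l.foldl (fun a m => if p m then a else a ++ [(m, PySem.List.pyGetD Dl (m - 1) 0)]) (pairsOf Dl acc)
    = pairsOf Dl (l.foldl (fun a m => if p m then a else a ++ [m]) acc) := by
  intro l
  induction l with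
  | nil => intro acc; simp
  | cons m l ih =>
    intro acc
    simp only [List.foldl_cons]
    by_cases h : p m
    · simp only [h, if_true]; exact ih acc
    · have hpair : pairsOf Dl acc ++ [(m, PySem.List.pyGetD Dl (m - 1) 0)] = pairsOf Dl (acc ++ [m]) := by
        simp [pairsOf]
      rw [if_neg h, if_neg h, hpair]
      exact ih (acc ++ [m])

-- A's inner queue pass is B's frontier pass (with any tail of already-queued next-level pairs)
theorem inner_eq (adj : PySem.Dict Int (List Int)) (Dl : List Int) :
    ∀ (fr : List Int) (g : List Int) (vis : List Bool),
    bfsInnerA adj Dl vis (pairsOf Dl fr ++ pairsOf Dl g) fr.length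
    = ((procLevelB adj Dl vis fr).1, (procLevelB adj Dl vis fr).2.1,
       pairsOf Dl (g ++ (procLevelB adj Dl vis fr).2.2)) := by
  intro fr
  induction fr with
  | nil => intro g vis; simp [pairsOf, bfsInnerA, procLevelB]
  | cons n fr ih =>
    intro g vis
    simp only [pairsOf, List.map_cons, List.map_append, List.length_cons, List.cons_append]
    rw [bfsInnerA]
    have hp := pushes_pair Dl (fun m => visGet (visSet vis n) m) (adj.getD n []) []
    simp only [pairsOf, List.map_nil] at hp
    rw [hp, List.append_assoc, ← List.map_append]
    have ihx := ih (g ++ (List.foldl (fun a m => if visGet (visSet vis n) m = true then a else a ++ [m]) [] (adj.getD n []))) (visSet vis n)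
    simp only [pairsOf] at ihx
    rw [ihx, procLevelB]
    simp only [List.map_append, List.append_assoc]

-- A's level dict agrees, up to sorting, with B's raw level list
theorem outer_eq (adj : PySem.Dict Int (List Int)) (Dl : List Int) :
    ∀ (fuel : Nat) (vis : List Bool) (fr : List Int) (lvl : Int)
      (d : PySem.Dict Int (List Int)),
    (∀ L, lvl ≤ L → d.getD L [] = []) →
    (bfsOuterA adj Dl fuel vis (pairsOf Dl fr) lvl d).2
      = lvl + ((bfsLevelsB adj Dl fuel vis fr).length : Int)
    ∧ ∀ L : Int,
        PySem.List.sorted ((bfsOuterA adj Dl fuel vis (pairsOf Dl fr) lvl d).1.getD L []) (fun x => x) false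
        = if lvl ≤ L ∧ L < lvl + ((bfsLevelsB adj Dl fuel vis fr).length : Int)
          then PySem.List.sorted ((bfsLevelsB adj Dl fuel vis fr).getD (L - lvl).toNat []) (fun x => x) false
          else PySem.List.sorted (d.getD L []) (fun x => x) false := by
  intro fuel
  induction fuel with
  | zero =>
    intro vis fr lvl d hd
    refine ⟨by simp [bfsOuterA, bfsLevelsB], ?_⟩
    intro L
    simp only [bfsOuterA, bfsLevelsB, List.length_nil, Nat.cast_zero, add_zero]
    rw [if_neg (by omega)]
  | succ f ih =>
    intro vis fr lvl d hd
    by_cases hfr : fr = []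
    · subst hfr
      simp only [pairsOf, List.map_nil, bfsOuterA, bfsLevelsB, List.isEmpty_nil, if_true,
        List.length_nil, Nat.cast_zero, add_zero]
      exact ⟨by simp, fun L => by rw [if_neg (by omega)]⟩
    · simp only [pairsOf] at ih ⊢
      have hlen : (List.map (fun n => (n, PySem.List.pyGetD Dl (n - 1) 0)) fr).length = fr.length := by
        simp
      have hin := inner_eq adj Dl fr [] vis
      simp only [pairsOf, List.map_nil, List.append_nil, List.nil_append] at hin
      rw [bfsOuterA, bfsLevelsB, if_neg (by simp [List.isEmpty_iff, hfr]),
        if_neg (by simp [List.isEmpty_iff, hfr]), hlen]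
      simp only [hin]
      have hd' : ∀ L, lvl + 1 ≤ L →
          ((d.insert lvl (d.getD lvl [] ++ (procLevelB adj Dl vis fr).1)).getD L []) = [] := by
        intro L hL
        rw [PySem.Dict.getD_insert, if_neg (by omega)]
        exact hd L (by omega)
      have ihx := ih (procLevelB adj Dl vis fr).2.1 (procLevelB adj Dl vis fr).2.2 (lvl + 1)
        (d.insert lvl (d.getD lvl [] ++ (procLevelB adj Dl vis fr).1)) hd'
      refine ⟨?_, ?_⟩
      · rw [ihx.1]
        simp only [List.length_cons]
        push_cast
        ring
      · intro L
        rw [ihx.2 L]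
        by_cases hL : lvl ≤ L ∧ L < lvl + ((((procLevelB adj Dl vis fr).1 ::
              bfsLevelsB adj Dl f (procLevelB adj Dl vis fr).2.1 (procLevelB adj Dl vis fr).2.2).length : Nat) : Int)
        · rw [if_pos hL]
          by_cases hLl : L = lvl
          · rw [hLl]
            rw [if_neg (by omega)]
            rw [PySem.Dict.getD_insert, if_pos rfl, hd lvl (le_refl lvl), List.nil_append]
            simp only [sub_self, Int.toNat_zero, List.getD_cons_zero]
          · have hL1 : lvl + 1 ≤ L := by omega
            have hL2 : L < lvl + 1 + ((bfsLevelsB adj Dl f (procLevelB adj Dl vis fr).2.1 (procLevelB adj Dl vis fr).2.2).length : Int) := by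
              simp only [List.length_cons] at hL
              push_cast at hL ⊢
              omega
            rw [if_pos ⟨hL1, hL2⟩]
            have ht : (L - lvl).toNat = (L - (lvl + 1)).toNat + 1 := by omega
            rw [ht, List.getD_cons_succ]
        · rw [if_neg hL]
          have hcond : ¬ (lvl + 1 ≤ L ∧ L < lvl + 1 + ((bfsLevelsB adj Dl f (procLevelB adj Dl vis fr).2.1 (procLevelB adj Dl vis fr).2.2).length : Int)) := by
            simp only [List.length_cons] at hL
            push_cast at hL ⊢
            omega
          rw [if_neg hcond, PySem.Dict.getD_insert, if_neg (by
            intro hEq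
            exact hL ⟨by omega, by simp only [List.length_cons]; push_cast; omega⟩)]

-- A's binary search returns the count-of-smaller index on a sorted array
theorem lowerBoundGo_spec (arr : List Int) (x : Int)
    (hs : arr.Pairwise (· ≤ ·)) :
    ∀ (fuel : Nat) (lo hi res : Int), (hi + 1 - lo).toNat ≤ fuel →
    0 ≤ lo → lo - 1 ≤ hi → res = hi + 1 → hi ≤ (arr.length : Int) - 1 →
    (∀ i : Nat, (i : Int) < lo → ∀ h : i < arr.length, arr[i] < x) →
    (∀ i : Nat, res ≤ (i : Int) → ∀ h : i < arr.length, x ≤ arr[i]) →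
    ∃ k : Nat, lowerBoundGo arr x fuel lo hi res = (k : Int) ∧ k ≤ arr.length ∧
      (∀ i : Nat, i < k → ∀ h : i < arr.length, arr[i] < x) ∧
      (∀ h : k < arr.length, x ≤ arr[k]) := by
  have hmono := List.pairwise_iff_getElem.mp hs
  have H : ∀ (fuel : Nat) (lo hi res : Int), (hi + 1 - lo).toNat ≤ fuel →
      0 ≤ lo → lo - 1 ≤ hi → res = hi + 1 → hi ≤ (arr.length : Int) - 1 →
      (∀ i : Nat, (i : Int) < lo → ∀ h : i < arr.length, arr[i] < x) →
      (∀ i : Nat, res ≤ (i : Int) → ∀ h : i < arr.length, x ≤ arr[i]) →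
      ∃ k : Nat, lowerBoundGo arr x fuel lo hi res = (k : Int) ∧ k ≤ arr.length ∧
        (∀ i : Nat, i < k → ∀ h : i < arr.length, arr[i] < x) ∧
        (∀ h : k < arr.length, x ≤ arr[k]) := by
    intro fuel
    induction fuel with
    | zero =>
      intro lo hi res hf hlo hlohi hres hhi hlow hhigh
      rw [lowerBoundGo]
      refine ⟨res.toNat, by omega, by omega, ?_, ?_⟩
      · intro i hik h; exact hlow i (by omega) h
      · intro h; exact hhigh res.toNat (by omega) h
    | succ f ihf =>
      intro lo hi res hf hlo hlohi hres hhi hlow hhigh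
      by_cases hcmp : lo ≤ hi
      · rw [lowerBoundGo, if_pos hcmp]
        have hb := PySem.Int.floordiv_two_mid_bounds (lo := 0) (hi := hi - lo) (by omega)
        rw [zero_add] at hb
        set mid := lo + PySem.Int.floordiv (hi - lo) 2 with hmid
        have hmlo : lo ≤ mid := by omega
        have hmhi : mid ≤ hi := by omega
        have hmlen : mid < (arr.length : Int) := by omega
        have hget : PySem.List.pyGetD arr mid 0 = arr[mid.toNat]'(by omega) :=
          PySem.List.pyGetD_eq_getElem arr 0 (by omega) (by omega)
        by_cases hge : PySem.List.pyGetD arr mid 0 ≥ x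
        · rw [if_pos hge]
          refine ihf lo (mid - 1) mid (by omega) hlo (by omega) (by omega) (by omega) hlow ?_
          intro i hi2 h
          rcases Nat.lt_or_ge mid.toNat i with hlt | hge2
          · have hle : arr[mid.toNat]'(by omega) ≤ arr[i] := hmono mid.toNat i (by omega) h hlt
            have hxm : x ≤ arr[mid.toNat]'(by omega) := by rw [← hget]; exact hge
            omega
          · have : (i : Int) = mid := by omega
            have : i = mid.toNat := by omega
            subst this
            rw [← hget]; exact hge
        · rw [if_neg hge]
          have hgelt : PySem.List.pyGetD arr mid 0 < x := by omega
          refine ihf (mid + 1) hi res (by omega) (by omega) (by omega) hres hhi ?_ hhigh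
          intro i hi2 h
          rcases lt_or_ge (i : Int) lo with hlt | hge2
          · exact hlow i hlt h
          · have hile : i ≤ mid.toNat := by omega
            rcases Nat.lt_or_ge i mid.toNat with h2 | h2
            · have hle : arr[i] ≤ arr[mid.toNat]'(by omega) := hmono i mid.toNat h (by omega) h2
              have hxm : arr[mid.toNat]'(by omega) < x := by rw [← hget]; exact hgelt
              omega
            · have : i = mid.toNat := by omega
              subst this
              rw [← hget]; exact hgelt
      · rw [lowerBoundGo, if_neg hcmp]
        refine ⟨res.toNat, by omega, by omega, ?_, ?_⟩
        · intro i hik h; exact hlow i (by omega) h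
        · intro h; exact hhigh res.toNat (by omega) h
  exact H

-- B's scan, started on some b with x ≤ b, yields the minimum of b and the filtered tail
theorem bscan_some (x : Int) :
    ∀ (l : List Int) (b : Int), x ≤ b →
    ∃ m, l.foldl (bstep x) (some b) = some m ∧ x ≤ m ∧ (m = b ∨ m ∈ l) ∧ m ≤ b ∧
      ∀ v ∈ l, x ≤ v → m ≤ v := by
  intro l
  induction l with
  | nil => intro b hb; exact ⟨b, rfl, hb, Or.inl rfl, le_refl b, by simp⟩
  | cons v rest ih =>
    intro b hb
    simp only [List.foldl_cons, bstep]
    by_cases hxv : v ≥ x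
    · rw [if_pos hxv]
      by_cases hvb : v < b
      · rw [if_pos hvb]
        obtain ⟨m, hm, hxm, hmem, hmle, hall⟩ := ih v hxv
        refine ⟨m, hm, hxm, ?_, by omega, ?_⟩
        · rcases hmem with h | h
          · exact Or.inr (by simp [h])
          · exact Or.inr (List.mem_cons_of_mem _ h)
        · intro w hw hxw
          rcases List.mem_cons.mp hw with h | h
          · omega
          · exact hall w h hxw
      · rw [if_neg hvb]
        obtain ⟨m, hm, hxm, hmem, hmle, hall⟩ := ih b hb
        refine ⟨m, hm, hxm, ?_, hmle, ?_⟩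
        · rcases hmem with h | h
          · exact Or.inl h
          · exact Or.inr (List.mem_cons_of_mem _ h)
        · intro w hw hxw
          rcases List.mem_cons.mp hw with h | h
          · omega
          · exact hall w h hxw
    · rw [if_neg hxv]
      obtain ⟨m, hm, hxm, hmem, hmle, hall⟩ := ih b hb
      refine ⟨m, hm, hxm, ?_, hmle, ?_⟩
      · rcases hmem with h | h
        · exact Or.inl h
        · exact Or.inr (List.mem_cons_of_mem _ h)
      · intro w hw hxw
        rcases List.mem_cons.mp hw with h | h
        · omega
        · exact hall w h hxw

-- B's scan from None stays None exactly when every element is < x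
theorem bscan_none (x : Int) :
    ∀ (l : List Int), (∀ v ∈ l, v < x) → l.foldl (bstep x) none = none := by
  intro l
  induction l with
  | nil => intro _; rfl
  | cons v rest ih =>
    intro h
    simp only [List.foldl_cons, bstep]
    rw [if_neg (by have := h v (by simp); omega)]
    exact ih (fun w hw => h w (by simp [hw]))

-- B's scan from None finds the minimum element ≥ x when one exists
theorem bscan_found (x : Int) :
    ∀ (l : List Int), (∃ v ∈ l, x ≤ v) →
    ∃ m, l.foldl (bstep x) none = some m ∧ x ≤ m ∧ m ∈ l ∧ ∀ v ∈ l, x ≤ v → m ≤ v := by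
  intro l
  induction l with
  | nil => rintro ⟨v, hv, _⟩; simp at hv
  | cons v rest ih =>
    intro hex
    simp only [List.foldl_cons, bstep]
    by_cases hxv : v ≥ x
    · rw [if_pos hxv]
      obtain ⟨m, hm, hxm, hmem, hmle, hall⟩ := bscan_some x rest v hxv
      refine ⟨m, hm, hxm, ?_, ?_⟩
      · rcases hmem with h | h
        · simp [h]
        · exact List.mem_cons_of_mem _ h
      · intro w hw hxw
        rcases List.mem_cons.mp hw with h | h
        · omega
        · exact hall w h hxw
    · rw [if_neg hxv]
      obtain ⟨w, hw, hxw⟩ := hex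
      rcases List.mem_cons.mp hw with h | h
      · omega
      · obtain ⟨m, hm, hxm, hmem, hall⟩ := ih ⟨w, h, hxw⟩
        refine ⟨m, hm, hxm, List.mem_cons_of_mem _ hmem, ?_⟩
        intro u hu hxu
        rcases List.mem_cons.mp hu with h2 | h2
        · omega
        · exact hall u h2 hxu

-- the query loops agree: A's sort+binary-search value is B's min-of-filter value
theorem query_eq (S : List (List Int)) (hpos : 0 < S.length) :
    ∀ (qs : List (Int × Int)) (d : PySem.Dict Int (List Int)) (ans : List Int),
    (∀ L : Int, 0 ≤ L → L < (S.length : Int) →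
        PySem.List.sorted (d.getD L []) (fun x => x) false
        = PySem.List.sorted (S.getD L.toNat []) (fun x => x) false) →
    (qs.foldl
      (fun st q =>
        let L := PySem.Int.mod q.1 ((S.length : Int))
        let p := lowerBoundA (st.1.getD L []) q.2
        (st.1.insert L p.1,
         st.2 ++ [if p.2 ≥ PySem.List.len p.1 then -1 else PySem.List.pyGetD p.1 p.2 0]))
      (d, ans)).2
    = qs.foldl
        (fun out q =>
          let arr := PySem.List.pyGetD S (PySem.Int.mod q.1 ((S.length : Int))) []
          let best := arr.foldl (bstep q.2) none
          out ++ [match best with | none => -1 | some m => m])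
        ans := by
  intro qs
  induction qs with
  | nil => intro d ans hinv; simp
  | cons q rest ih =>
    intro d ans hinv
    simp only [List.foldl_cons]
    have hSpos : (0 : Int) < (S.length : Int) := by exact_mod_cast hpos
    set L := PySem.Int.mod q.1 ((S.length : Int)) with hLdef
    have hL0 : 0 ≤ L := PySem.Int.mod_nonneg q.1 hSpos
    have hL1 : L < (S.length : Int) := PySem.Int.mod_lt q.1 hSpos
    have harr : PySem.List.sorted (d.getD L []) (fun x => x) false
        = PySem.List.sorted (S.getD L.toNat []) (fun x => x) false := hinv L hL0 hL1
    have harrB : PySem.List.pyGetD S L [] = S.getD L.toNat [] := by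
      rw [PySem.List.pyGetD_eq_getElem S [] hL0 hL1]
      exact (List.getD_eq_getElem S [] (by omega)).symm
    set l := S.getD L.toNat [] with hldef
    set sa := PySem.List.sorted l (fun x => x) false with hsadef
    have hp : sa.Pairwise (· ≤ ·) := PySem.List.sorted_pairwise l (fun x => x)
    have hperm : sa.Perm l := PySem.List.sorted_perm l (fun x => x) false
    -- characterise A's search on sa
    obtain ⟨k, hkeq, hkle, hklo, hkhi⟩ :=
      lowerBoundGo_spec sa q.2 hp sa.length 0 ((sa.length : Int) - 1) (sa.length : Int)
        (by omega) (by omega) (by omega) (by omega) (by omega)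
        (fun i hi h => by omega) (fun i hi h => by omega)
    -- the two appended answers agree
    have hval : (if lowerBoundGo sa q.2 sa.length 0 ((sa.length : Int) - 1) (sa.length : Int) ≥ ((sa.length : Int))
                 then (-1 : Int) else PySem.List.pyGetD sa (lowerBoundGo sa q.2 sa.length 0 ((sa.length : Int) - 1) (sa.length : Int)) 0)
              = (match l.foldl (bstep q.2) none with | none => (-1 : Int) | some m => m) := by
      rw [hkeq]
      by_cases hcase : k < sa.length
      · -- element found: both return the minimum element ≥ x
        rw [if_neg (by exact_mod_cast not_le.mpr (by exact_mod_cast hcase))]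
        have hgetk : PySem.List.pyGetD sa (k : Int) 0 = sa[k]'hcase :=
          PySem.List.pyGetD_eq_getElem sa 0 (by omega) (by exact_mod_cast hcase)
        have hxk : q.2 ≤ sa[k]'hcase := hkhi hcase
        have hmin : ∀ v ∈ sa, q.2 ≤ v → sa[k]'hcase ≤ v := by
          intro v hv hxv
          obtain ⟨i, hi, hvi⟩ := List.mem_iff_getElem.mp hv
          rcases Nat.lt_trichotomy i k with h2 | h2 | h2
          · have := hklo i h2 hi; omega
          · subst h2; omega
          · have hmono := List.pairwise_iff_getElem.mp hp
            have := hmono k i hcase hi h2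
            omega
        obtain ⟨m, hm, hxm, hmem, hall⟩ :=
          bscan_found q.2 l ⟨sa[k]'hcase, hperm.mem_iff.mp (sa.getElem_mem hcase), hxk⟩
        rw [hm]
        have h1 : sa[k]'hcase ≤ m := hmin m (hperm.mem_iff.mpr hmem) hxm
        have h2 : m ≤ sa[k]'hcase := hall _ (hperm.mem_iff.mp (sa.getElem_mem hcase)) hxk
        rw [hgetk]
        show sa[k]'hcase = m
        omega
      · -- nothing ≥ x: both return -1
        rw [if_pos (by omega)]
        have hall : ∀ v ∈ l, v < q.2 := by
          intro v hv
          obtain ⟨i, hi, hvi⟩ := List.mem_iff_getElem.mp (hperm.mem_iff.mpr hv)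
          have := hklo i (by omega) hi
          omega
        rw [bscan_none q.2 l hall]
    -- step the fold
    show ((rest.foldl _ (d.insert L (PySem.List.sorted (d.getD L []) (fun x => x) false), _))).2 = _
    rw [ih (d.insert L (PySem.List.sorted (d.getD L []) (fun x => x) false)) _ ?hinv']
    case hinv' =>
      intro M hM0 hM1
      rw [PySem.Dict.getD_insert]
      by_cases hML : M = L
      · rw [if_pos hML, PySem.List.sorted_sorted, hML, harr]
      · rw [if_neg hML]
        exact hinv M hM0 hM1
    -- align the appended element
    simp only [lowerBoundA, harr, harrB, PySem.List.len_eq, hval]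

-- ===== VERDICT (by name: the statement is the Claim_ definition above) =====
theorem solve_spec : Claim_equal_solve := by
  unfold Claim_equal_solve
  intro A B C D E F hdom hpre
  obtain ⟨hA, hD, hBC, hEF, _⟩ := hpre
  unfold Spec_solve solve solve_alt
  have hadj : buildAdjA B C = buildAdjB B C := by
    unfold buildAdjA buildAdjB
    exact foldl_range_pair (fun d u v => dictAppend (dictAppend d u v) v u) B C hBC _
  have hq1 : [((1 : Int), PySem.List.pyGetD D 0 0)] = pairsOf D [1] := by
    simp [pairsOf]
  simp only [hadj, hq1, PySem.List.len_eq]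
  set S := bfsLevelsB (buildAdjB B C) D (A + 2).toNat (visNew A) [1] with hSdef
  set R := bfsOuterA (buildAdjB B C) D (A + 2).toNat (visNew A) (pairsOf D [1]) 0 PySem.Dict.empty with hRdef
  have houter := outer_eq (buildAdjB B C) D ((A + 2).toNat) (visNew A) [1] 0 PySem.Dict.empty
    (by intro L _; simp [PySem.Dict.getD_empty])
  rw [← hSdef, ← hRdef] at houter
  have hSlen : 0 < S.length := by
    rw [hSdef]
    have hsplit : (A + 2).toNat = ((A + 2).toNat - 1) + 1 := by omega
    rw [hsplit, bfsLevelsB, if_neg (by simp)]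
    simp
  have hr2 : R.2 = ((S.length : Nat) : Int) := by
    rw [houter.1]; ring
  have hinv : ∀ L : Int, 0 ≤ L → L < (S.length : Int) →
      PySem.List.sorted (R.1.getD L []) (fun x => x) false
      = PySem.List.sorted (S.getD L.toNat []) (fun x => x) false := by
    intro L h0 h1
    have h2 := houter.2 L
    rw [if_pos ⟨h0, by omega⟩] at h2
    rw [h2, sub_zero]
  rw [hr2]
  have hzip := foldl_range_pair
    (fun (st : PySem.Dict Int (List Int) × List Int) (e x : Int) =>
      (st.1.insert (PySem.Int.mod e ((S.length : Int)))
         (lowerBoundA (st.1.getD (PySem.Int.mod e ((S.length : Int))) []) x).1,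
       st.2 ++ [if (lowerBoundA (st.1.getD (PySem.Int.mod e ((S.length : Int))) []) x).2 ≥
                    (((lowerBoundA (st.1.getD (PySem.Int.mod e ((S.length : Int))) []) x).1.length : Nat) : Int)
                then -1
                else PySem.List.pyGetD (lowerBoundA (st.1.getD (PySem.Int.mod e ((S.length : Int))) []) x).1
                       (lowerBoundA (st.1.getD (PySem.Int.mod e ((S.length : Int))) []) x).2 0]))
    E F hEF (R.1, ([] : List Int))
  exact (congrArg Prod.snd hzip).trans (query_eq S hSlen (E.zip F) R.1 [] hinv)
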